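-- pv_equiv track=rewrite | github.com/Daeell/AlGORITM-STUDY | programmers/62048/scw.py | solution
-- ===== SOURCE A (Python) =====
-- def solution(w,h):
--     answer = 1
--
--     def gcd(a,b):
--         while b>0:
--             a, b = b, a%b
--         return a
--
--     answer = w*h - (w+h - gcd(w,h))
--
--     return answer
-- ===== SOURCE B (Python) =====
-- def solution(w, h):
--     def gcd(a, b):
--         return a if b <= 0 else gcd(b, a % b)
--     return (w - 1) * (h - 1) + gcd(w, h) - 1
-- ===== Notes on version B (the rewrite author's own statement) =====
-- stated objective: simpler
-- what changed: Replaces the iterative while-loop Euclid helper with a direct recursive gcd and rewrites the counting formula algebraically as (w-1)*(h-1)+gcd(w,h)-1, dropping the dead 'answer = 1' initialisation.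
import Mathlib
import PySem

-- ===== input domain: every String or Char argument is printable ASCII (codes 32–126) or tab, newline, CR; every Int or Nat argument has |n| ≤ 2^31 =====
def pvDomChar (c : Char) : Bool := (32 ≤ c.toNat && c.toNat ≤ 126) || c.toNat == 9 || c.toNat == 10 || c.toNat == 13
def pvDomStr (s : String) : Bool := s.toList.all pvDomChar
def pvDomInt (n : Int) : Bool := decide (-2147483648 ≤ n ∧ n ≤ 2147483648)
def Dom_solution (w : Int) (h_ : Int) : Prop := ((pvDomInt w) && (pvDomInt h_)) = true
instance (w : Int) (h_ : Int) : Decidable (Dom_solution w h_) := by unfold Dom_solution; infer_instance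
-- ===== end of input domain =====

-- B drops the dead `answer = 1`, replaces the while-loop Euclid helper by a direct
-- recursive gcd, and states the formula algebraically as (w-1)*(h-1)+gcd(w,h)-1.

-- ===== PORT A =====
-- the inner `def gcd(a,b): while b>0: a,b = b, a%b; return a`
def solutionGcdA (a b : Int) : Int :=
  if 0 < b then solutionGcdA b (PySem.Int.mod a b) else a
termination_by b.toNat
decreasing_by
  have h1 := PySem.Int.mod_nonneg a ‹0 < b›
  have h2 := PySem.Int.mod_lt a ‹0 < b›
  omega

def solution (w : Int) (h_ : Int) : Int :=
  let answer : Int := 1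
  let answer := w * h_ - (w + h_ - solutionGcdA w h_)
  answer

-- ===== PORT B =====
-- the inner `def gcd(a,b): return a if b <= 0 else gcd(b, a % b)`
def solutionGcdB (a b : Int) : Int :=
  if b ≤ 0 then a else solutionGcdB b (PySem.Int.mod a b)
termination_by b.toNat
decreasing_by
  have hb : 0 < b := by omega
  have h1 := PySem.Int.mod_nonneg a hb
  have h2 := PySem.Int.mod_lt a hb
  omega

def solution_alt (w : Int) (h_ : Int) : Int :=
  (w - 1) * (h_ - 1) + solutionGcdB w h_ - 1

-- ===== PRECONDITION & SPEC =====
def Spec_solution (w : Int) (h_ : Int) (out : Int) : Prop := out = solution_alt w h_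
instance (w : Int) (h_ : Int) (out : Int) : Decidable (Spec_solution w h_ out) := by unfold Spec_solution; infer_instance

-- ===== CLAIM (what is proved, stated in full; the proofs are below) =====
def Claim_equal_solution : Prop := ∀ (w : Int) (h_ : Int), Dom_solution w h_ → Spec_solution w h_ (solution w h_)

-- ===== LEMMAS AND PROOFS =====
theorem gcdA_eq_gcdB (a b : Int) : solutionGcdA a b = solutionGcdB a b := by
  induction a, b using solutionGcdA.induct with
  | case1 a b hb ih =>
    rw [solutionGcdA, solutionGcdB, if_pos hb, if_neg (by omega), ih]
  | case2 a b hb =>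
    rw [solutionGcdA, solutionGcdB, if_neg hb, if_pos (by omega)]

-- ===== VERDICT (by name: the statement is the Claim_ definition above) =====
theorem solution_spec : Claim_equal_solution := by
  intro w h_ _
  unfold Spec_solution solution solution_alt
  rw [gcdA_eq_gcdB]
  ring
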